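-- pv_equiv track=rewrite | github.com/jk-jung/problem-solving | codewars/6kyu/6_Frog jumping.py | solution
-- ===== SOURCE A (Python) =====
-- def solution(a):
--     ck = [0 for _ in range(len(a))]
--     s = 0
--     cnt = 0
--     while True:
--         ck[s] = 1
--         s += a[s]
--         cnt += 1
--         if s < 0 or s >= len(a):
--             return cnt
--         if ck[s]:
--             return -1
-- ===== SOURCE B (Python) =====
-- def solution(a):
--     n = len(a)
--     slow = 0
--     fast = 0
--     steps = 0
--     while True:
--         fast += a[fast]
--         steps += 1
--         if fast < 0 or fast >= n:
--             return steps
--         fast += a[fast]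
--         steps += 1
--         if fast < 0 or fast >= n:
--             return steps
--         slow += a[slow]
--         if slow == fast:
--             return -1
-- ===== Notes on version B (the rewrite author's own statement) =====
-- stated objective: alternative
-- what changed: Replaces A's visited-marking array with Floyd's tortoise-and-hare cycle detection: a fast pointer advances two jumps per iteration (returning its step count on exit) and a slow pointer one jump, reporting -1 when they meet; O(1) extra space instead of A's O(n) marking table.
import Mathlib
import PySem

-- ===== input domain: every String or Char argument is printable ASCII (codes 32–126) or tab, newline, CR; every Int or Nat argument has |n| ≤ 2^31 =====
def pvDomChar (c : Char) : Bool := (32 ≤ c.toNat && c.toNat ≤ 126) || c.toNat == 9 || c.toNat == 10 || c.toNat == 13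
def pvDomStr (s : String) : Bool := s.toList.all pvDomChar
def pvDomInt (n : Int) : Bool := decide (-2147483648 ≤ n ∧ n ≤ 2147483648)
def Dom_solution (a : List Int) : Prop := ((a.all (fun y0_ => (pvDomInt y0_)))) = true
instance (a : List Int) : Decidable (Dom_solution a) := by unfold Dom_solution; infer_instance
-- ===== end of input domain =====

-- B replaces A's visited-marking array with Floyd's tortoise-and-hare cycle
-- detection (two-speed pointers, O(1) extra space); proved to return A's exact value.


-- ===== PORT A =====
-- A's while-loop, one recursive call per iteration over the state (ck, s, cnt).
-- fuel only makes the recursion total; a.length + 1 iterations always suffice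
-- (proved below).  Indexing/assignment are exact for the reachable in-range s.
def solutionLoopA (a : List Int) : List Int → Int → Int → Nat → Int
  | _, _, _, 0 => 0
  | ck, s, cnt, fuel + 1 =>
    let ck' := PySem.List.pySetD ck s 1          -- ck[s] = 1
    let s' := s + PySem.List.pyGetD a s 0        -- s += a[s]
    let cnt' := cnt + 1
    if s' < 0 ∨ (a.length : Int) ≤ s' then cnt'
    else if PySem.List.pyGetD ck' s' 0 ≠ 0 then -1   -- if ck[s]:
    else solutionLoopA a ck' s' cnt' fuel

def solution (a : List Int) : Int :=
  solutionLoopA a (List.replicate a.length 0) 0 0 (a.length + 1)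

-- ===== PORT B =====
-- B's while-loop (Floyd): state is (slow, fast, steps); two fast jumps and one
-- slow jump per iteration; fuel a.length + 1 iterations always suffice (proved below).
def solutionLoopB (a : List Int) : Int → Int → Int → Nat → Int
  | _, _, _, 0 => 0
  | slow, fast, steps, fuel + 1 =>
    let fast1 := fast + PySem.List.pyGetD a fast 0     -- fast += a[fast]
    let steps1 := steps + 1
    if fast1 < 0 ∨ (a.length : Int) ≤ fast1 then steps1
    else
      let fast2 := fast1 + PySem.List.pyGetD a fast1 0 -- fast += a[fast]
      let steps2 := steps1 + 1
      if fast2 < 0 ∨ (a.length : Int) ≤ fast2 then steps2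
      else
        let slow1 := slow + PySem.List.pyGetD a slow 0 -- slow += a[slow]
        if slow1 = fast2 then -1
        else solutionLoopB a slow1 fast2 steps2 fuel

def solution_alt (a : List Int) : Int :=
  solutionLoopB a 0 0 0 (a.length + 1)

-- ===== PRECONDITION & SPEC =====
-- Pre_ excludes only the empty list, on which both Pythons raise IndexError.
def Pre_solution (a : List Int) : Prop := a ≠ []
instance (a : List Int) : Decidable (Pre_solution a) := by unfold Pre_solution; infer_instance
def pvWitness_solution : List Int := [1]

def Spec_solution (a : List Int) (out : Int) : Prop := out = solution_alt a
instance (a : List Int) (out : Int) : Decidable (Spec_solution a out) := by unfold Spec_solution; infer_instance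

-- ===== CLAIM (what is proved, stated in full; the proofs are below) =====
def Claim_equal_solution : Prop := ∀ (a : List Int), Dom_solution a → Pre_solution a → Spec_solution a (solution a)

-- ===== LEMMAS AND PROOFS =====

-- one frog jump from position t
def stepf (a : List Int) (t : Int) : Int := t + PySem.List.pyGetD a t 0

-- the frog's trajectory: pos a t = position after t jumps
def pos (a : List Int) : ℕ → Int
  | 0 => 0
  | t + 1 => stepf a (pos a t)

lemma pos_succ (a : List Int) (t : ℕ) : pos a (t + 1) = stepf a (pos a t) := rfl

-- the position after t jumps is still on the board
def InB (a : List Int) (t : ℕ) : Prop := 0 ≤ pos a t ∧ pos a t < (a.length : Int)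

-- a minimal witness of a nonempty set of naturals (classical, no decidability needed)
lemma nat_exists_min (P : ℕ → Prop) (h : ∃ n, P n) : ∃ n, P n ∧ ∀ m < n, ¬ P m := by
  obtain ⟨n, hn⟩ := h
  induction n using Nat.strong_induction_on with
  | _ n ih =>
    by_cases h' : ∃ m, m < n ∧ P m
    · obtain ⟨m, hm, hPm⟩ := h'
      exact ih m hm hPm
    · push_neg at h'
      exact ⟨n, hn, h'⟩

-- periodicity: one period of length d starting at i propagates forward
lemma per (a : List Int) (i d : ℕ) (h : pos a (i + d) = pos a i) :
    ∀ k, pos a (i + k + d) = pos a (i + k) := by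
  intro k
  induction k with
  | zero => simpa using h
  | succ k ih =>
    rw [show i + (k + 1) + d = (i + k + d) + 1 by omega, pos_succ, ih]
    rfl

lemma per_mul (a : List Int) (i d : ℕ) (h : pos a (i + d) = pos a i) :
    ∀ m k, pos a (i + k + m * d) = pos a (i + k) := by
  intro m
  induction m with
  | zero => intro k; simp
  | succ m ih =>
    intro k
    rw [show i + k + (m + 1) * d = i + (k + m * d) + d by ring, per a i d h (k + m * d),
        show i + (k + m * d) = i + k + m * d by omega, ih k]

-- once the trajectory repeats inside the board it stays on the board forever
lemma cycle_forever (a : List Int) (i d : ℕ) (h : pos a (i + d) = pos a i) (hd : 0 < d)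
    (hpre : ∀ t < i + d, InB a t) : ∀ t, InB a t := by
  intro t
  induction t using Nat.strong_induction_on with
  | _ t ih =>
    by_cases ht : t < i + d
    · exact hpre t ht
    · push_neg at ht
      have h1 : pos a t = pos a (t - d) := by
        have h2 := per a i d h (t - d - i)
        rw [show i + (t - d - i) + d = t by omega, show i + (t - d - i) = t - d by omega] at h2
        exact h2
      have h2 := ih (t - d) (by omega)
      unfold InB at *
      rw [h1]
      exact h2

-- pigeonhole: a trajectory that stays on the board for a.length + 1 steps repeats
lemma pigeon (a : List Int) (h : ∀ t, t ≤ a.length → InB a t) :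
    ∃ i j, i < j ∧ j ≤ a.length ∧ pos a i = pos a j := by
  have hmaps : ∀ t ∈ Finset.range (a.length + 1),
      (pos a t).toNat ∈ Finset.range a.length := by
    intro t ht
    simp only [Finset.mem_range] at ht ⊢
    have h2 := h t (by omega)
    unfold InB at h2
    omega
  obtain ⟨i, hi, j, hj, hne, heq⟩ :=
    Finset.exists_ne_map_eq_of_card_lt_of_maps_to (by simp) hmaps
  simp only [Finset.mem_range] at hi hj
  have hii := h i (by omega)
  have hjj := h j (by omega)
  unfold InB at hii hjj
  have heq' : pos a i = pos a j := by omega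
  rcases lt_or_gt_of_ne hne with hlt | hgt
  · exact ⟨i, j, hlt, by omega, heq'⟩
  · exact ⟨j, i, hgt, by omega, heq'.symm⟩

-- the first exit happens within a.length steps
lemma exit_le (a : List Int) (T : ℕ) (hT : ¬ InB a T) (hmin : ∀ t < T, InB a t) :
    T ≤ a.length := by
  by_contra hc
  push_neg at hc
  obtain ⟨i, j, hij, hjn, heq⟩ := pigeon a (fun t ht => hmin t (by omega))
  have hper : pos a (i + (j - i)) = pos a i := by
    rw [show i + (j - i) = j by omega]; exact heq.symm
  exact hT (cycle_forever a i (j - i) hper (by omega)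
    (fun t ht => hmin t (by omega)) T)

-- if the trajectory never leaves, slow and fast meet within a.length steps
lemma meet_exists (a : List Int) (hin : ∀ t, InB a t) :
    ∃ k, 1 ≤ k ∧ k ≤ a.length ∧ pos a k = pos a (2 * k) := by
  obtain ⟨i, j, hij, hjn, heq⟩ := pigeon a (fun t _ => hin t)
  have hd0 : 0 < j - i := by omega
  have hper : pos a (i + (j - i)) = pos a i := by
    rw [show i + (j - i) = j by omega]; exact heq.symm
  by_cases hi0 : i = 0
  · refine ⟨j - i, hd0, by omega, ?_⟩
    have h1 := per_mul a i (j - i) hper 1 (j - i)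
    subst hi0
    rw [show (0 : ℕ) + (j - 0) + 1 * (j - 0) = 2 * (j - 0) by omega,
        show (0 : ℕ) + (j - 0) = j - 0 by omega] at h1
    exact h1.symm
  · set d := j - i with hdd
    set q := (i - 1) / d + 1 with hqd
    set k := d * q with hkd
    have hdm := Nat.div_add_mod (i - 1) d
    have hmod : (i - 1) % d < d := Nat.mod_lt _ hd0
    have hk : k = d * ((i - 1) / d) + d := by rw [hkd, hqd, Nat.mul_add, Nat.mul_one]
    have hik : i ≤ k := by omega
    have hkn : k ≤ a.length := by omega
    have hcomm : q * d = k := by rw [hkd, Nat.mul_comm]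
    refine ⟨k, by omega, hkn, ?_⟩
    have h1 := per_mul a i d hper q (k - i)
    rw [show i + (k - i) = k by omega] at h1
    rw [show 2 * k = k + q * d by omega]
    exact h1.symm

-- getD after marking one cell
lemma getD_set_ne_zero (ck : List Int) (j i : ℕ) (hj : j < ck.length) :
    ((ck.set j (1 : Int)).getD i 0 ≠ 0) ↔ (i = j ∨ ck.getD i 0 ≠ 0) := by
  by_cases hij : i = j
  · subst hij
    simp [List.getD_eq_getElem?_getD, hj]
  · simp [List.getD_eq_getElem?_getD, hij,
      List.getElem?_set_ne (by omega : j ≠ i)]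

-- ===== A-side characterisation =====

-- exit case: A returns the index of the first off-board position
lemma LA_exit (a : List Int) (T : ℕ) (hT : ¬ InB a T) (hmin : ∀ t < T, InB a t) :
    ∀ fuel k ck, ck.length = a.length →
      (∀ i : ℕ, i < a.length → ck.getD i 0 ≠ 0 → ∃ m, m < k ∧ pos a m = (i : Int)) →
      k < T → T ≤ k + fuel →
      solutionLoopA a ck (pos a k) (k : Int) fuel = (T : Int) := by
  intro fuel
  induction fuel with
  | zero => intro k ck _ _ h1 h2; omega
  | succ fuel ih =>
    intro k ck hlen hmk hkT hTf
    have hkin := hmin k hkT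
    unfold InB at hkin
    have hknat : (pos a k).toNat < ck.length := by omega
    have hsetD : PySem.List.pySetD ck (pos a k) 1 = ck.set (pos a k).toNat 1 :=
      PySem.List.pySetD_of_nonneg ck 1 hkin.1
    show (if stepf a (pos a k) < 0 ∨ (a.length : Int) ≤ stepf a (pos a k) then (k : Int) + 1
          else if PySem.List.pyGetD (PySem.List.pySetD ck (pos a k) 1) (stepf a (pos a k)) 0 ≠ 0 then -1
          else solutionLoopA a (PySem.List.pySetD ck (pos a k) 1) (stepf a (pos a k)) ((k : Int) + 1) fuel) = (T : Int)
    rw [← pos_succ]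
    by_cases h1 : k + 1 = T
    · have hout : ¬ InB a (k + 1) := h1 ▸ hT
      unfold InB at hout
      rw [if_pos (by omega)]
      omega
    · have hin1 := hmin (k + 1) (by omega)
      have hin1' := hin1
      unfold InB at hin1'
      rw [if_neg (by omega)]
      have hget : PySem.List.pyGetD (PySem.List.pySetD ck (pos a k) 1) (pos a (k + 1)) 0 =
          (ck.set (pos a k).toNat 1).getD (pos a (k + 1)).toNat 0 := by
        rw [hsetD, PySem.List.pyGetD_of_nonneg _ 0 hin1'.1]
      have hnomark : ¬ (PySem.List.pyGetD (PySem.List.pySetD ck (pos a k) 1) (pos a (k + 1)) 0 ≠ 0) := by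
        rw [hget]
        intro hne
        rcases (getD_set_ne_zero ck (pos a k).toNat (pos a (k + 1)).toNat hknat).1 hne with he | hold
        · -- pos (k+1) = pos k : a 1-cycle, trajectory never leaves — contradicts exit at T
          have heq : pos a (k + 1) = pos a k := by omega
          exact hT (cycle_forever a k 1 (by simpa using heq) (by omega)
            (fun t ht => hmin t (by omega)) T)
        · obtain ⟨m, hm, hpm⟩ := hmk (pos a (k + 1)).toNat (by omega) hold
          have heq : pos a (m + (k + 1 - m)) = pos a m := by
            rw [show m + (k + 1 - m) = k + 1 by omega, hpm]
            omega
          exact hT (cycle_forever a m (k + 1 - m) heq (by omega)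
            (fun t ht => hmin t (by omega)) T)
      rw [if_neg hnomark]
      have := ih (k + 1) (ck.set (pos a k).toNat 1) (by simp [hlen])
        (by
          intro i hi hne
          rcases (getD_set_ne_zero ck (pos a k).toNat i (by omega)).1 hne with he | hold
          · exact ⟨k, by omega, by rw [he]; omega⟩
          · obtain ⟨m, hm, hpm⟩ := hmk i hi hold
            exact ⟨m, by omega, hpm⟩)
        (by omega) (by omega)
      rw [hsetD]
      push_cast at this ⊢
      exact this

-- cycle case: A returns -1 at the first revisited position
lemma LA_cyc (a : List Int) (R : ℕ) (hR : ∃ i, i < R ∧ pos a i = pos a R)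
    (hRmin : ∀ j < R, ¬ ∃ i, i < j ∧ pos a i = pos a j) (hin : ∀ t, InB a t) :
    ∀ fuel k ck, ck.length = a.length →
      (∀ i : ℕ, i < a.length → (ck.getD i 0 ≠ 0 ↔ ∃ m, m < k ∧ pos a m = (i : Int))) →
      k < R → R ≤ k + fuel →
      solutionLoopA a ck (pos a k) (k : Int) fuel = -1 := by
  intro fuel
  induction fuel with
  | zero => intro k ck _ _ h1 h2; omega
  | succ fuel ih =>
    intro k ck hlen hmk hkR hRf
    have hkin := hin k
    have hin1 := hin (k + 1)
    unfold InB at hkin hin1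
    have hknat : (pos a k).toNat < ck.length := by omega
    have hsetD : PySem.List.pySetD ck (pos a k) 1 = ck.set (pos a k).toNat 1 :=
      PySem.List.pySetD_of_nonneg ck 1 hkin.1
    show (if stepf a (pos a k) < 0 ∨ (a.length : Int) ≤ stepf a (pos a k) then (k : Int) + 1
          else if PySem.List.pyGetD (PySem.List.pySetD ck (pos a k) 1) (stepf a (pos a k)) 0 ≠ 0 then -1
          else solutionLoopA a (PySem.List.pySetD ck (pos a k) 1) (stepf a (pos a k)) ((k : Int) + 1) fuel) = -1
    rw [← pos_succ, if_neg (by omega)]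
    have hget : PySem.List.pyGetD (PySem.List.pySetD ck (pos a k) 1) (pos a (k + 1)) 0 =
        (ck.set (pos a k).toNat 1).getD (pos a (k + 1)).toNat 0 := by
      rw [hsetD, PySem.List.pyGetD_of_nonneg _ 0 hin1.1]
    have hchar : (ck.set (pos a k).toNat 1).getD (pos a (k + 1)).toNat 0 ≠ 0 ↔
        ∃ m, m < k + 1 ∧ pos a m = pos a (k + 1) := by
      rw [getD_set_ne_zero ck (pos a k).toNat (pos a (k + 1)).toNat hknat]
      constructor
      · rintro (he | hold)
        · exact ⟨k, by omega, by omega⟩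
        · obtain ⟨m, hm, hpm⟩ := (hmk (pos a (k + 1)).toNat (by omega)).1 hold
          exact ⟨m, by omega, by omega⟩
      · rintro ⟨m, hm, hpm⟩
        by_cases hmk' : m = k
        · subst hmk'; left; omega
        · right
          exact (hmk (pos a (k + 1)).toNat (by omega)).2 ⟨m, by omega, by omega⟩
    by_cases h1 : k + 1 = R
    · rw [if_pos (by rw [hget]; exact hchar.2 (by
        obtain ⟨i, hi, heq⟩ := hR
        exact ⟨i, by omega, by rw [heq, h1]⟩))]
    · have hnomark : ¬ (PySem.List.pyGetD (PySem.List.pySetD ck (pos a k) 1) (pos a (k + 1)) 0 ≠ 0) := by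
        rw [hget]
        intro hne
        exact hRmin (k + 1) (by omega) (hchar.1 hne)
      rw [if_neg hnomark]
      have := ih (k + 1) (ck.set (pos a k).toNat 1) (by simp [hlen])
        (by
          intro i hi
          rw [getD_set_ne_zero ck (pos a k).toNat i (by omega)]
          constructor
          · rintro (he | hold)
            · subst he
              exact ⟨k, by omega, (Int.toNat_of_nonneg hkin.1).symm⟩
            · obtain ⟨m, hm, hpm⟩ := (hmk i hi).1 hold
              exact ⟨m, by omega, hpm⟩
          · rintro ⟨m, hm, hpm⟩
            by_cases hmk' : m = k
            · subst hmk'; left; rw [hpm]; simp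
            · right; exact (hmk i hi).2 ⟨m, by omega, hpm⟩)
        (by omega) (by omega)
      rw [hsetD]
      push_cast at this ⊢
      exact this

-- ===== B-side characterisation =====

-- exit case: the fast pointer leaves first, at exactly the first exit step
lemma LB_exit (a : List Int) (T : ℕ) (hT : ¬ InB a T) (hmin : ∀ t < T, InB a t) :
    ∀ fuel k, 2 * k < T → T ≤ 2 * k + 2 * fuel →
      solutionLoopB a (pos a k) (pos a (2 * k)) ((2 * k : ℕ) : Int) fuel = (T : Int) := by
  intro fuel
  induction fuel with
  | zero => intro k h1 h2; omega
  | succ fuel ih =>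
    intro k hkT hTf
    show (if stepf a (pos a (2 * k)) < 0 ∨ (a.length : Int) ≤ stepf a (pos a (2 * k)) then ((2 * k : ℕ) : Int) + 1
          else if stepf a (stepf a (pos a (2 * k))) < 0 ∨ (a.length : Int) ≤ stepf a (stepf a (pos a (2 * k))) then ((2 * k : ℕ) : Int) + 1 + 1
          else if stepf a (pos a k) = stepf a (stepf a (pos a (2 * k))) then -1
          else solutionLoopB a (stepf a (pos a k)) (stepf a (stepf a (pos a (2 * k)))) (((2 * k : ℕ) : Int) + 1 + 1) fuel) = (T : Int)
    rw [show stepf a (pos a (2 * k)) = pos a (2 * k + 1) from rfl,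
        show stepf a (pos a (2 * k + 1)) = pos a (2 * k + 2) from rfl,
        show stepf a (pos a k) = pos a (k + 1) from rfl]
    by_cases h1 : 2 * k + 1 = T
    · have hout : ¬ InB a (2 * k + 1) := h1 ▸ hT
      unfold InB at hout
      rw [if_pos (by omega)]
      push_cast
      omega
    · have hin1 := hmin (2 * k + 1) (by omega)
      unfold InB at hin1
      rw [if_neg (by omega)]
      by_cases h2 : 2 * k + 2 = T
      · have hout : ¬ InB a (2 * k + 2) := h2 ▸ hT
        unfold InB at hout
        rw [if_pos (by omega)]
        push_cast
        omega
      · have hin2 := hmin (2 * k + 2) (by omega)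
        unfold InB at hin2
        rw [if_neg (by omega)]
        have hnomeet : ¬ pos a (k + 1) = pos a (2 * k + 2) := by
          intro heq
          have hper : pos a ((k + 1) + (k + 1)) = pos a (k + 1) := by
            rw [show (k + 1) + (k + 1) = 2 * k + 2 by omega]
            exact heq.symm
          exact hT (cycle_forever a (k + 1) (k + 1) hper (by omega)
            (fun t ht => hmin t (by omega)) T)
        rw [if_neg hnomeet]
        have := ih (k + 1) (by omega) (by omega)
        rw [show 2 * (k + 1) = 2 * k + 2 by omega] at this
        push_cast at this ⊢
        exact this

-- cycle case: slow and fast meet at the first index K ≥ 1 with pos K = pos 2K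
lemma LB_cyc (a : List Int) (K : ℕ) (_hK1 : 1 ≤ K) (hKeq : pos a K = pos a (2 * K))
    (hKmin : ∀ k < K, ¬ (1 ≤ k ∧ pos a k = pos a (2 * k))) (hin : ∀ t, InB a t) :
    ∀ fuel k, k < K → K ≤ k + fuel →
      solutionLoopB a (pos a k) (pos a (2 * k)) ((2 * k : ℕ) : Int) fuel = -1 := by
  intro fuel
  induction fuel with
  | zero => intro k h1 h2; omega
  | succ fuel ih =>
    intro k hkK hKf
    have hin1 := hin (2 * k + 1)
    have hin2 := hin (2 * k + 2)
    unfold InB at hin1 hin2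
    show (if stepf a (pos a (2 * k)) < 0 ∨ (a.length : Int) ≤ stepf a (pos a (2 * k)) then ((2 * k : ℕ) : Int) + 1
          else if stepf a (stepf a (pos a (2 * k))) < 0 ∨ (a.length : Int) ≤ stepf a (stepf a (pos a (2 * k))) then ((2 * k : ℕ) : Int) + 1 + 1
          else if stepf a (pos a k) = stepf a (stepf a (pos a (2 * k))) then -1
          else solutionLoopB a (stepf a (pos a k)) (stepf a (stepf a (pos a (2 * k)))) (((2 * k : ℕ) : Int) + 1 + 1) fuel) = -1
    rw [show stepf a (pos a (2 * k)) = pos a (2 * k + 1) from rfl,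
        show stepf a (pos a (2 * k + 1)) = pos a (2 * k + 2) from rfl,
        show stepf a (pos a k) = pos a (k + 1) from rfl,
        if_neg (by omega), if_neg (by omega)]
    by_cases h1 : k + 1 = K
    · rw [if_pos (by rw [show 2 * k + 2 = 2 * (k + 1) by omega, h1]; exact hKeq)]
    · have hnomeet : ¬ pos a (k + 1) = pos a (2 * k + 2) := by
        rw [show 2 * k + 2 = 2 * (k + 1) by omega]
        intro heq
        exact hKmin (k + 1) (by omega) ⟨by omega, heq⟩
      rw [if_neg hnomeet]
      have := ih (k + 1) (by omega) (by omega)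
      rw [show 2 * (k + 1) = 2 * k + 2 by omega] at this
      push_cast at this ⊢
      exact this

-- ===== VERDICT (by name: the statement is the Claim_ definition above) =====
theorem solution_spec : Claim_equal_solution := by
  intro a _ hpre
  have hn : 0 < a.length := by
    cases a with
    | nil => exact absurd rfl hpre
    | cons x xs => simp
  show solution a = solution_alt a
  unfold solution solution_alt
  by_cases hex : ∃ T, ¬ InB a T
  · obtain ⟨T, hT, hmin⟩ := nat_exists_min (fun T => ¬ InB a T) hex
    have hmin' : ∀ t < T, InB a t := fun t ht => not_not.1 (hmin t ht)
    have hT0 : 0 < T := by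
      rcases Nat.eq_zero_or_pos T with h | h
      · exfalso; apply hT; rw [h]; unfold InB pos; constructor <;> omega
      · exact h
    have hTn : T ≤ a.length := exit_le a T hT hmin'
    have hA := LA_exit a T hT hmin' (a.length + 1) 0 (List.replicate a.length 0)
      (by simp)
      (by intro i hi hne; exfalso; exact hne (by simp [List.getD_eq_getElem?_getD, hi]))
      hT0 (by omega)
    have hB := LB_exit a T hT hmin' (a.length + 1) 0 (by omega) (by omega)
    simp only [Nat.mul_zero, Nat.cast_zero] at hA hB
    rw [show pos a 0 = 0 from rfl] at hA hB
    rw [hA, hB]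
  · have hin : ∀ t, InB a t := fun t => not_not.1 (fun h => hex ⟨t, h⟩)
    obtain ⟨i0, j0, hij0, hj0n, heq0⟩ := pigeon a (fun t _ => hin t)
    obtain ⟨R, hR, hRmin⟩ := nat_exists_min (fun j => ∃ i, i < j ∧ pos a i = pos a j)
      ⟨j0, i0, hij0, heq0⟩
    have hRn : R ≤ j0 := by
      by_contra hc
      exact hRmin j0 (by omega) ⟨i0, hij0, heq0⟩
    obtain ⟨k0, hk01, hk0n, hk0eq⟩ := meet_exists a hin
    obtain ⟨K, hK, hKmin⟩ := nat_exists_min (fun k => 1 ≤ k ∧ pos a k = pos a (2 * k))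
      ⟨k0, hk01, hk0eq⟩
    have hKn : K ≤ k0 := by
      by_contra hc
      exact hKmin k0 (by omega) ⟨hk01, hk0eq⟩
    have hR0 : 0 < R := by
      obtain ⟨i, hi, _⟩ := hR
      omega
    have hA := LA_cyc a R hR hRmin hin (a.length + 1) 0 (List.replicate a.length 0)
      (by simp)
      (by
        intro i hi
        constructor
        · intro hne; exfalso; exact hne (by simp [List.getD_eq_getElem?_getD, hi])
        · rintro ⟨m, hm, _⟩; omega)
      hR0 (by omega)
    have hB := LB_cyc a K hK.1 hK.2 hKmin hin (a.length + 1) 0 (by omega) (by omega)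
    simp only [Nat.mul_zero, Nat.cast_zero] at hA hB
    rw [show pos a 0 = 0 from rfl] at hA hB
    rw [hA, hB]
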